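-- pv_equiv track=rewrite | github.com/swekshajha12/DissIt | Interview/cisco/maximum_element_sum_upto_target.py | max_elements_sum_to_target_recursive
-- ===== SOURCE A (Python) =====
-- def max_elements_sum_to_target_recursive(nums, target, n):
--     if target == 0 or n == 0:
--         return 0
--
--     # If the last element is greater than the target, ignore it
--     if nums[n - 1] > target:
--         return max_elements_sum_to_target_recursive(nums, target, n - 1)
--
--     # Either include or exclude the last element in the sum
--     include_last = 1 + max_elements_sum_to_target_recursive(nums, target - nums[n - 1], n - 1)
--     exclude_last = max_elements_sum_to_target_recursive(nums, target, n - 1)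
--
--     return max(include_last, exclude_last)
-- ===== SOURCE B (Python) =====
-- def max_elements_sum_to_target_recursive(nums, target, n):
--     # Same recurrence evaluated top-down with memoisation on (remaining target, prefix length),
--     # so each distinct subproblem is computed once instead of once per call path.
--     memo = {}
--
--     def go(t, k):
--         if t == 0 or k == 0:
--             return 0
--         key = (t, k)
--         if key in memo:
--             return memo[key]
--         a = nums[k - 1]
--         if a > t:
--             r = go(t, k - 1)
--         else:
--             r = max(1 + go(t - a, k - 1), go(t, k - 1))
--         memo[key] = r
--         return r
--
--     return go(target, n)
-- ===== Notes on version B (the rewrite author's own statement) =====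
-- stated objective: alternative
-- what changed: Replaces A's pure branching recursion by top-down dynamic programming: the same include/exclude recurrence memoised in a dict keyed on (remaining target, prefix length), so each distinct subproblem is computed once per key.
import Mathlib
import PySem

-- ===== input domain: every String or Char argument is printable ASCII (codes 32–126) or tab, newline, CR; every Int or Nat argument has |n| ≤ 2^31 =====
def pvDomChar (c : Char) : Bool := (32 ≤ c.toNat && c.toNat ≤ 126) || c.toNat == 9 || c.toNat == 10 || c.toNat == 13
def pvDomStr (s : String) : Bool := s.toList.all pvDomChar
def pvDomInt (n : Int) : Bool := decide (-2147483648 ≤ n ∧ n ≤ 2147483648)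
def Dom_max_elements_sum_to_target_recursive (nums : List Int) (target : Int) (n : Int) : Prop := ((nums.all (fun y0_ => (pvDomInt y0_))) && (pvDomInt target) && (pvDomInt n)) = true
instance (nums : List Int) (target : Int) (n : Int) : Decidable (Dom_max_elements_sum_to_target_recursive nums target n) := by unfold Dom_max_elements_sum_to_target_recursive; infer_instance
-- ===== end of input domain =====

-- B evaluates A's include/exclude recurrence top-down with a memo dict keyed on
-- (remaining target, prefix length): same return value everywhere A returns, each distinct subproblem computed once per key.

-- ===== PORT A =====
-- A recurses on the Int n, decreasing by 1; inside Pre_ the recursion only runs for 0 ≤ n,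
-- so the port carries the depth as n.toNat (exact there; where Python raises, Pre_ excludes).
def goA (nums : List Int) : Int → Nat → Int
  | _, 0 => 0
  | t, m + 1 =>
    if t = 0 then 0
    else
      match PySem.List.pyGet? nums (((m + 1 : Nat) : Int) - 1) with
      | none => 0  -- IndexError in Python; excluded by Pre_
      | some a =>
        if a > t then goA nums t m
        else max (1 + goA nums (t - a) m) (goA nums t m)

def max_elements_sum_to_target_recursive (nums : List Int) (target : Int) (n : Int) : Int :=
  goA nums target n.toNat

-- ===== PORT B =====
-- the memo dict is threaded through the recursion; keys are (t, k) as in Source B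
def goB (nums : List Int) : Int → Nat → PySem.Dict (Int × Int) Int → Int × PySem.Dict (Int × Int) Int
  | _, 0, memo => (0, memo)
  | t, m + 1, memo =>
    if t = 0 then (0, memo)
    else
      match memo.get? (t, ((m + 1 : Nat) : Int)) with
      | some v => (v, memo)
      | none =>
        match PySem.List.pyGet? nums (((m + 1 : Nat) : Int) - 1) with
        | none => (0, memo)  -- IndexError in Python; excluded by Pre_
        | some a =>
          if a > t then
            let p := goB nums t m memo
            (p.1, p.2.insert (t, ((m + 1 : Nat) : Int)) p.1)
          else
            let q1 := goB nums (t - a) m memo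
            let q2 := goB nums t m q1.2
            (max (1 + q1.1) q2.1, q2.2.insert (t, ((m + 1 : Nat) : Int)) (max (1 + q1.1) q2.1))

def max_elements_sum_to_target_recursive_alt (nums : List Int) (target : Int) (n : Int) : Int :=
  (goB nums target n.toNat PySem.Dict.empty).1

-- ===== PRECONDITION & SPEC =====
-- Pre_ excludes exactly the inputs on which A raises IndexError: target ≠ 0 with n < 0 or n > len(nums)
def Pre_max_elements_sum_to_target_recursive (nums : List Int) (target : Int) (n : Int) : Prop :=
  target = 0 ∨ (0 ≤ n ∧ n ≤ nums.length)
instance (nums : List Int) (target : Int) (n : Int) : Decidable (Pre_max_elements_sum_to_target_recursive nums target n) := by unfold Pre_max_elements_sum_to_target_recursive; infer_instance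

def pvWitness_max_elements_sum_to_target_recursive : List Int × Int × Int := ([1, 2, 3], 4, 3)

def Spec_max_elements_sum_to_target_recursive (nums : List Int) (target : Int) (n : Int) (out : Int) : Prop := out = max_elements_sum_to_target_recursive_alt nums target n
instance (nums : List Int) (target : Int) (n : Int) (out : Int) : Decidable (Spec_max_elements_sum_to_target_recursive nums target n out) := by unfold Spec_max_elements_sum_to_target_recursive; infer_instance

-- ===== CLAIM (what is proved, stated in full; the proofs are below) =====
def Claim_equal_max_elements_sum_to_target_recursive : Prop := ∀ (nums : List Int) (target : Int) (n : Int), Dom_max_elements_sum_to_target_recursive nums target n → Pre_max_elements_sum_to_target_recursive nums target n → Spec_max_elements_sum_to_target_recursive nums target n (max_elements_sum_to_target_recursive nums target n)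

-- ===== LEMMAS AND PROOFS =====

-- memo invariant: every stored value is the A-recursion's value at its key
def MemoInv (nums : List Int) (d : PySem.Dict (Int × Int) Int) : Prop :=
  ∀ (t k v : Int), d.get? (t, k) = some v → v = goA nums t k.toNat

lemma memoInv_empty (nums : List Int) : MemoInv nums PySem.Dict.empty := by
  intro t k v h
  simp [PySem.Dict.get?_empty] at h

lemma memoInv_insert (nums : List Int) (d : PySem.Dict (Int × Int) Int) (t : Int) (k : Nat)
    (v : Int) (hd : MemoInv nums d) (hv : v = goA nums t k) :
    MemoInv nums (d.insert (t, (k : Int)) v) := by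
  intro t' k' w h
  rw [PySem.Dict.get?_insert] at h
  split at h
  · rename_i heq
    cases h
    have h1 : t' = t ∧ k' = (k : Int) := Prod.mk.injEq .. ▸ heq
    obtain ⟨rfl, rfl⟩ := h1
    rw [Int.toNat_natCast]
    exact hv
  · exact hd t' k' w h

lemma goB_correct (nums : List Int) : ∀ (k : Nat) (t : Int) (memo : PySem.Dict (Int × Int) Int),
    MemoInv nums memo →
    (goB nums t k memo).1 = goA nums t k ∧ MemoInv nums (goB nums t k memo).2 := by
  intro k
  induction k with
  | zero =>
    intro t memo hInv
    exact ⟨rfl, hInv⟩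
  | succ m ih =>
    intro t memo hInv
    by_cases ht : t = 0
    · rw [goB, goA, if_pos ht, if_pos ht]
      exact ⟨rfl, hInv⟩
    rw [goB, if_neg ht]
    cases hget : memo.get? (t, ((m + 1 : Nat) : Int)) with
    | some v =>
      have hv := hInv t ((m + 1 : Nat) : Int) v hget
      rw [Int.toNat_natCast] at hv
      exact ⟨hv, hInv⟩
    | none =>
      cases ha : PySem.List.pyGet? nums (((m + 1 : Nat) : Int) - 1) with
      | none =>
        have hgoA : goA nums t (m + 1) = 0 := by rw [goA, if_neg ht, ha]
        exact ⟨hgoA.symm, hInv⟩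
      | some a =>
        have hgoA : goA nums t (m + 1) =
            if a > t then goA nums t m
            else max (1 + goA nums (t - a) m) (goA nums t m) := by
          rw [goA, if_neg ht, ha]
        by_cases hat : a > t
        · dsimp only
          rw [if_pos hat]
          obtain ⟨h1, h2⟩ := ih t memo hInv
          refine ⟨?_, ?_⟩
          · rw [hgoA, if_pos hat]; exact h1
          · exact memoInv_insert nums _ t (m + 1) _ h2 (by rw [h1, hgoA, if_pos hat])
        · dsimp only
          rw [if_neg hat]
          obtain ⟨h1, h2⟩ := ih (t - a) memo hInv
          obtain ⟨h3, h4⟩ := ih t _ h2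
          refine ⟨?_, ?_⟩
          · rw [hgoA, if_neg hat, h1, h3]
          · exact memoInv_insert nums _ t (m + 1) _ h4 (by rw [h1, h3, hgoA, if_neg hat])

-- ===== VERDICT (by name: the statement is the Claim_ definition above) =====
theorem max_elements_sum_to_target_recursive_spec : Claim_equal_max_elements_sum_to_target_recursive := by
  intro nums target n _ _
  unfold Spec_max_elements_sum_to_target_recursive
  unfold max_elements_sum_to_target_recursive max_elements_sum_to_target_recursive_alt
  exact ((goB_correct nums n.toNat target PySem.Dict.empty (memoInv_empty nums)).1).symm
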